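-- pv_equiv track=rewrite | github.com/JochenWeerda/VALEO-NeuroERP-3.0 | app/communication/crisis_plan.py | _generate_communication_recommendations
-- ===== SOURCE A (Python) =====
-- from typing import Dict, Any, List, Optional, Tuple
--
-- def _generate_communication_recommendations(issues: List[str]) -> List[str]:
--     """Generate recommendations based on communication issues"""
--     recommendations = []
--
--     if any('response' in issue.lower() for issue in issues):
--         recommendations.append("Improve stakeholder engagement and follow-up procedures")
--
--     if any('delivery' in issue.lower() for issue in issues):
--         recommendations.append("Review and optimize communication channels and delivery methods")
--
--     if any('delayed' in issue.lower() for issue in issues):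
--         recommendations.append("Streamline communication approval and distribution processes")
--
--     if not recommendations:
--         recommendations.append("Maintain current communication standards and continue monitoring effectiveness")
--
--     return recommendations
-- ===== SOURCE B (Python) =====
-- def _generate_communication_recommendations(issues):
--     """Single pass: record which keywords were seen, then emit messages in fixed order."""
--     seen = {'response': False, 'delivery': False, 'delayed': False}
--     for issue in issues:
--         low = issue.lower()
--         for kw in seen:
--             if kw in low:
--                 seen[kw] = True
--         if all(seen.values()):
--             break
--     messages = [
--         ('response', "Improve stakeholder engagement and follow-up procedures"),
--         ('delivery', "Review and optimize communication channels and delivery methods"),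
--         ('delayed', "Streamline communication approval and distribution processes"),
--     ]
--     recommendations = [msg for kw, msg in messages if seen[kw]]
--     if not recommendations:
--         recommendations.append("Maintain current communication standards and continue monitoring effectiveness")
--     return recommendations
-- ===== Notes on version B (the rewrite author's own statement) =====
-- stated objective: alternative
-- what changed: Replaces three separate any() scans over the issues list with one pass that records which keywords were seen (breaking once all three are found) followed by a fixed-order output pass over a keyword/message table.
import Mathlib
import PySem

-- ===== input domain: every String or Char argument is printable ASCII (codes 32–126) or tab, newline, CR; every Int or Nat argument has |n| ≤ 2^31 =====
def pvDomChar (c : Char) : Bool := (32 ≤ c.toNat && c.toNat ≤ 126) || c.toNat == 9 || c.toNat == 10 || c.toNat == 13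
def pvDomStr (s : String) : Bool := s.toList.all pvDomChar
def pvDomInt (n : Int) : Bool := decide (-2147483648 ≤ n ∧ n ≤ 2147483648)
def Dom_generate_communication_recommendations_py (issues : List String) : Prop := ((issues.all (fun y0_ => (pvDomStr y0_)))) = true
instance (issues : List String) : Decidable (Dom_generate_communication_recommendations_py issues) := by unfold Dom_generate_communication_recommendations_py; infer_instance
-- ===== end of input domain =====

-- B replaces A's three separate any() scans with one pass recording seen keywords plus a fixed-order output pass (alternative decomposition, same cost).

-- shared transliteration of the subexpression "kw in issue.lower()"
def pvHasKw (kw : String) (issue : String) : Bool := PySem.Str.isIn kw (PySem.Str.lower issue)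

-- ===== PORT A =====
def generate_communication_recommendations_py (issues : List String) : List String :=
  let recommendations : List String := []
  let recommendations := if issues.any (fun issue => pvHasKw "response" issue)
    then recommendations ++ ["Improve stakeholder engagement and follow-up procedures"] else recommendations
  let recommendations := if issues.any (fun issue => pvHasKw "delivery" issue)
    then recommendations ++ ["Review and optimize communication channels and delivery methods"] else recommendations
  let recommendations := if issues.any (fun issue => pvHasKw "delayed" issue)
    then recommendations ++ ["Streamline communication approval and distribution processes"] else recommendations
  let recommendations := if recommendations = []
    then recommendations ++ ["Maintain current communication standards and continue monitoring effectiveness"] else recommendations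
  recommendations

-- ===== PORT B =====
-- the scanning loop of Source B: updates the three seen-flags per issue, stops early once all are set
def pvSeenLoop (issues : List String) (r d l : Bool) : Bool × Bool × Bool :=
  match issues with
  | [] => (r, d, l)
  | issue :: rest =>
    let low := PySem.Str.lower issue
    let r := r || PySem.Str.isIn "response" low
    let d := d || PySem.Str.isIn "delivery" low
    let l := l || PySem.Str.isIn "delayed" low
    if r && d && l then (r, d, l) else pvSeenLoop rest r d l

def generate_communication_recommendations_py_alt (issues : List String) : List String :=
  let seen := pvSeenLoop issues false false false
  let messages : List (Bool × String) :=
    [(seen.1, "Improve stakeholder engagement and follow-up procedures"),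
     (seen.2.1, "Review and optimize communication channels and delivery methods"),
     (seen.2.2, "Streamline communication approval and distribution processes")]
  let recommendations := (messages.filter (fun p => p.1)).map Prod.snd
  if recommendations = []
    then recommendations ++ ["Maintain current communication standards and continue monitoring effectiveness"]
    else recommendations

-- ===== PRECONDITION & SPEC =====
def Spec_generate_communication_recommendations_py (issues : List String) (out : List String) : Prop := out = generate_communication_recommendations_py_alt issues
instance (issues : List String) (out : List String) : Decidable (Spec_generate_communication_recommendations_py issues out) := by unfold Spec_generate_communication_recommendations_py; infer_instance

-- ===== CLAIM (what is proved, stated in full; the proofs are below) =====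
def Claim_equal_generate_communication_recommendations_py : Prop := ∀ (issues : List String), Dom_generate_communication_recommendations_py issues → Spec_generate_communication_recommendations_py issues (generate_communication_recommendations_py issues)

-- ===== LEMMAS AND PROOFS =====

theorem pvSeenLoop_eq (issues : List String) (r d l : Bool) :
    pvSeenLoop issues r d l =
      (r || issues.any (fun i => pvHasKw "response" i),
       d || issues.any (fun i => pvHasKw "delivery" i),
       l || issues.any (fun i => pvHasKw "delayed" i)) := by
  induction issues generalizing r d l with
  | nil => simp [pvSeenLoop]
  | cons i rest ih =>
    simp only [pvSeenLoop, List.any_cons]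
    split
    · rename_i h
      simp only [Bool.and_eq_true] at h
      simp only [pvHasKw, ← Bool.or_assoc, h.1.1, h.1.2, h.2, Bool.true_or]
    · rw [ih]
      simp [pvHasKw, Bool.or_assoc]

theorem generate_communication_recommendations_py_spec : Claim_equal_generate_communication_recommendations_py := by
  intro issues _
  show generate_communication_recommendations_py issues = generate_communication_recommendations_py_alt issues
  unfold generate_communication_recommendations_py generate_communication_recommendations_py_alt
  rw [pvSeenLoop_eq]
  simp only [Bool.false_or]
  cases issues.any (fun i => pvHasKw "response" i) <;>
  cases issues.any (fun i => pvHasKw "delivery" i) <;>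
  cases issues.any (fun i => pvHasKw "delayed" i) <;> simp
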